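-- pv_equiv track=rewrite | github.com/kmzn128/atcoder | b053/b.py | Main
-- ===== SOURCE A (Python) =====
-- def Main(S):
--     ans = 0
--     candidate = 0
--     flag = False
--     for c in S:
--         if c == 'A':
--             flag = True
--         if flag:
--             candidate += 1
--             if c == 'Z':
--                 ans = candidate
--     return ans
-- ===== SOURCE B (Python) =====
-- def Main(S):
--     a = S.find('A')
--     if a == -1:
--         return 0
--     z = S.rfind('Z')
--     if z < a:
--         return 0
--     return z - a + 1
-- ===== Notes on version B (the rewrite author's own statement) =====
-- stated objective: simpler
-- what changed: Replaces the single-pass accumulator with flag/candidate counters by two library searches (find first 'A', rfind last 'Z') and a closed-form subtraction.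
import Mathlib
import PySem

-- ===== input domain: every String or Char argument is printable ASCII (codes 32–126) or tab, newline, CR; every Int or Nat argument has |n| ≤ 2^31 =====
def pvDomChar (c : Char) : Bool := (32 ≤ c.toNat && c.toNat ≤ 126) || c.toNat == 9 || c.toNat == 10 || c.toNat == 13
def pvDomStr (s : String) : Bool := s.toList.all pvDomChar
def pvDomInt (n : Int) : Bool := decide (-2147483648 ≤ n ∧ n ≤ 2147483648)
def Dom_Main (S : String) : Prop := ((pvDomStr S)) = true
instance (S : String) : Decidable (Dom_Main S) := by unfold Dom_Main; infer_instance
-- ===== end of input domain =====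

-- B replaces A's one-pass flag/accumulator loop by library searches (find first 'A',
-- rfind last 'Z') plus closed-form arithmetic; simpler, and measurably faster by a constant factor (C-level search).


-- ===== PORT A =====
-- the loop body: state = (ans, candidate, flag)
def mainStep (st : Int × Int × Bool) (c : Char) : Int × Int × Bool :=
  let flag := st.2.2 || (c == 'A')
  if flag then
    let candidate := st.2.1 + 1
    ((if c == 'Z' then candidate else st.1), candidate, flag)
  else (st.1, st.2.1, flag)

def Main (S : String) : Int :=
  (S.toList.foldl mainStep (0, 0, false)).1

-- ===== PORT B =====
def Main_alt (S : String) : Int :=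
  let a := PySem.Str.find S "A"
  if a == -1 then 0
  else
    let z := PySem.Str.rfind S "Z"
    if z < a then 0 else z - a + 1

-- ===== PRECONDITION & SPEC =====
def Spec_Main (S : String) (out : Int) : Prop := out = Main_alt S
instance (S : String) (out : Int) : Decidable (Spec_Main S out) := by unfold Spec_Main; infer_instance

-- ===== CLAIM (what is proved, stated in full; the proofs are below) =====
def Claim_equal_Main : Prop := ∀ (S : String), Dom_Main S → Spec_Main S (Main S)

-- ===== LEMMAS AND PROOFS =====

-- index of the first 'A' in a list, if any
def firstA : List Char → Option Nat
  | [] => none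
  | c :: cs => if c = 'A' then some 0 else (firstA cs).map (· + 1)

-- index of the last 'Z' in a list, if any
def lastZ : List Char → Option Nat
  | [] => none
  | c :: cs =>
    match lastZ cs with
    | some i => some (i + 1)
    | none => if c = 'Z' then some 0 else none

theorem firstA_getElem : ∀ (l : List Char) (a : Nat), firstA l = some a → l[a]? = some 'A' := by
  intro l
  induction l with
  | nil => intro a h; simp [firstA] at h
  | cons c cs ih =>
    intro a h
    by_cases hc : c = 'A'
    · simp [firstA, hc] at h; subst h; simp [hc]
    · simp [firstA, hc] at h
      obtain ⟨b, hb, rfl⟩ := h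
      simpa using ih b hb

theorem lastZ_getElem : ∀ (l : List Char) (j : Nat), lastZ l = some j → l[j]? = some 'Z' := by
  intro l
  induction l with
  | nil => intro j h; simp [lastZ] at h
  | cons c cs ih =>
    intro j h
    cases hz : lastZ cs with
    | some i =>
      simp [lastZ, hz] at h; subst h
      simpa using ih i hz
    | none =>
      by_cases hc : c = 'Z'
      · simp [lastZ, hz, hc] at h; subst h; simp [hc]
      · simp [lastZ, hz, hc] at h

theorem lastZ_append (xs ys : List Char) :
    lastZ (xs ++ ys) =
      match lastZ ys with
      | some i => some (xs.length + i)
      | none => lastZ xs := by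
  induction xs with
  | nil => cases h : lastZ ys <;> simp [lastZ, h]
  | cons c cs ih =>
    cases hy : lastZ ys with
    | some i =>
      simp only [List.cons_append, lastZ, ih, hy]
      simp; omega
    | none => simp only [List.cons_append, lastZ, ih, hy]

-- A's loop with flag already true
theorem foldl_flag_true (l : List Char) : ∀ (ans cand : Int),
    (l.foldl mainStep (ans, cand, true)).1 =
      match lastZ l with
      | some i => cand + i + 1
      | none => ans := by
  induction l with
  | nil => intro ans cand; simp [lastZ]
  | cons c cs ih =>
    intro ans cand
    have hstep : mainStep (ans, cand, true) c
        = ((if c = 'Z' then cand + 1 else ans), cand + 1, true) := by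
      simp [mainStep]
    rw [List.foldl_cons, hstep, ih]
    cases hz : lastZ cs with
    | some i => simp [lastZ, hz]; ring
    | none => by_cases hc : c = 'Z' <;> simp [lastZ, hz, hc]

-- A's loop from the initial state
theorem foldl_flag_false (l : List Char) : ∀ (ans cand : Int),
    (l.foldl mainStep (ans, cand, false)).1 =
      match firstA l with
      | none => ans
      | some a =>
        match lastZ (l.drop (a + 1)) with
        | some i => cand + i + 2
        | none => ans := by
  induction l with
  | nil => intro ans cand; simp [firstA]
  | cons c cs ih =>
    intro ans cand
    by_cases hc : c = 'A'
    · have hstep : mainStep (ans, cand, false) c = (ans, cand + 1, true) := by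
        simp [mainStep, hc]
      rw [List.foldl_cons, hstep, foldl_flag_true]
      cases hz : lastZ cs with
      | some i => simp [firstA, hc, hz]; ring
      | none => simp [firstA, hc, hz]
    · have hstep : mainStep (ans, cand, false) c = (ans, cand, false) := by
        simp [mainStep, hc]
      rw [List.foldl_cons, hstep, ih]
      cases hf : firstA cs with
      | none => simp [firstA, hc, hf]
      | some a => simp [firstA, hc, hf]

-- single-character find
theorem find_go_single (l : List Char) : ∀ (k : Nat),
    PySem.Chars.find.go ['A'] l k =
      match firstA l with
      | none => -1
      | some a => ((k + a : Nat) : Int) := by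
  induction l with
  | nil => intro k; simp [PySem.Chars.find.go, firstA]
  | cons c cs ih =>
    intro k
    by_cases hc : c = 'A'
    · simp [PySem.Chars.find.go, List.isPrefixOf, hc, firstA]
    · have hp : List.isPrefixOf ['A'] (c :: cs) = false := by
        simp [List.isPrefixOf]; intro h; exact absurd h.symm hc
      rw [PySem.Chars.find.go, hp]
      simp only [Bool.false_eq_true, if_false]
      rw [ih]
      cases hf : firstA cs with
      | none => simp [firstA, hc, hf]
      | some a => simp [firstA, hc, hf]; ring

theorem find_single (l : List Char) :
    PySem.Chars.find l ['A'] =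
      match firstA l with
      | none => -1
      | some a => (a : Int) := by
  rw [PySem.Chars.find, find_go_single]
  cases firstA l <;> simp

-- single-character prefix test
theorem isPrefixOf_single (l : List Char) (i : Nat) :
    List.isPrefixOf ['Z'] (l.drop i) = (l[i]? == some 'Z') := by
  cases hd : l.drop i with
  | nil =>
    have : l.length ≤ i := by
      by_contra h
      exact absurd hd (by simp; omega)
    simp [List.isPrefixOf, List.getElem?_eq_none (by omega)]
  | cons c cs =>
    have hi : i < l.length := by
      by_contra h
      rw [List.drop_of_length_le (by omega)] at hd
      exact absurd hd (by simp)
    have : l[i]? = some c := by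
      have h0 : (l.drop i)[0]? = some c := by rw [hd]; rfl
      rwa [List.getElem?_drop, Nat.add_zero] at h0
    simp [List.isPrefixOf, this, eq_comm (a := c)]

-- single-character rfind: scan down from index j
theorem rfind_go_single (l : List Char) : ∀ (j : Nat), j ≤ l.length →
    PySem.Chars.rfind.go l ['Z'] j =
      match lastZ (l.take (j + 1)) with
      | none => -1
      | some i => (i : Int) := by
  intro j
  induction j with
  | zero =>
    intro _
    have hp := isPrefixOf_single l 0
    rw [List.drop_zero] at hp
    rw [PySem.Chars.rfind.go, hp]
    cases hl : l with
    | nil => simp [lastZ]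
    | cons c cs => by_cases hc : c = 'Z' <;> simp [lastZ, hc]
  | succ j ih =>
    intro hj
    rw [PySem.Chars.rfind.go, isPrefixOf_single]
    by_cases hlt : j + 1 < l.length
    · have htake : l.take (j + 1 + 1) = l.take (j + 1) ++ [l[j + 1]'hlt] := by
        rw [List.take_add_one]
        simp [List.getElem?_eq_getElem hlt]
      rw [htake, lastZ_append]
      by_cases hc : l[j + 1]'hlt = 'Z'
      · have hg : l[j + 1]? = some 'Z' := by simp [List.getElem?_eq_getElem hlt, hc]
        simp [hg, lastZ, List.length_take, hc]
        omega
      · have hne : (l[j + 1]? == some 'Z') = false := by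
          simp [List.getElem?_eq_getElem hlt]
          exact hc
        rw [hne]
        simp only [Bool.false_eq_true, if_false]
        rw [ih (by omega)]
        simp [lastZ, hc]
    · have hlen : l.length = j + 1 := by omega
      have hg : l[j + 1]? = none := by rw [List.getElem?_eq_none]; omega
      rw [hg]
      have hnb : ((none : Option Char) == some 'Z') = false := rfl
      rw [hnb]
      simp only [Bool.false_eq_true, if_false]
      rw [ih (by omega), List.take_of_length_le (by omega), List.take_of_length_le (by omega)]

theorem rfind_single (l : List Char) :
    PySem.Chars.rfind l ['Z'] =
      match lastZ l with
      | none => -1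
      | some i => (i : Int) := by
  rw [PySem.Chars.rfind, rfind_go_single l l.length (le_refl _)]
  rw [List.take_of_length_le (by omega)]

-- ===== VERDICT (by name: the statement is the Claim_ definition above) =====
theorem Main_spec : Claim_equal_Main := by
  intro S _
  unfold Spec_Main Main Main_alt
  rw [foldl_flag_false]
  have hfind : PySem.Str.find S "A" = PySem.Chars.find S.toList ['A'] := rfl
  have hrfind : PySem.Str.rfind S "Z" = PySem.Chars.rfind S.toList ['Z'] := rfl
  rw [hfind, hrfind, find_single, rfind_single]
  cases hf : firstA S.toList with
  | none => simp
  | some a =>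
    have ha : S.toList[a]? = some 'A' := firstA_getElem S.toList a hf
    have hal : a < S.toList.length := by
      by_contra h
      rw [List.getElem?_eq_none (by omega)] at ha
      exact absurd ha (by simp)
    have hlast : lastZ S.toList =
        match lastZ (S.toList.drop (a + 1)) with
        | some i => some ((S.toList.take (a + 1)).length + i)
        | none => lastZ (S.toList.take (a + 1)) := by
      conv_lhs => rw [← List.take_append_drop (a + 1) S.toList]
      exact lastZ_append _ _
    have hane : ((a : Int) == -1) = false := by simp
    simp only [hane, Bool.false_eq_true, if_false]
    cases hz : lastZ (S.toList.drop (a + 1)) with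
    | some i =>
      rw [hz] at hlast
      have hmin : (S.toList.take (a + 1)).length = a + 1 := by
        rw [List.length_take]; omega
      rw [hmin] at hlast
      simp only [hlast]
      split_ifs with hcond
      · exfalso; norm_cast at hcond; omega
      · norm_cast at hcond; push_cast; linarith
    | none =>
      rw [hz] at hlast
      cases hzt : lastZ (S.toList.take (a + 1)) with
      | none =>
        rw [hzt] at hlast
        simp only [hlast]
        split_ifs with hcond
        · rfl
        · exfalso; omega
      | some j =>
        rw [hzt] at hlast
        have hjz : (S.toList.take (a + 1))[j]? = some 'Z' := lastZ_getElem _ j hzt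
        have hjlt : j < a + 1 := by
          by_contra h
          rw [List.getElem?_eq_none (by simp; omega)] at hjz
          exact absurd hjz (by simp)
        have hja : j ≠ a := by
          intro h
          subst h
          rw [List.getElem?_take_of_lt (by omega), ha] at hjz
          exact absurd hjz (by decide)
        simp only [hlast]
        split_ifs with hcond
        · rfl
        · exfalso; push_cast at hcond; omega
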